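-- pv_equiv track=rewrite | github.com/builtbyai/Admin | html_to_webstack.py | fix_navigation_links
-- ===== SOURCE A (Python) =====
-- def fix_navigation_links(html_content):
--     """Fix navigation links to point to actual files"""
--     replacements = [
--         ('href="#gallery"', 'href="gallery.html"'),
--         ('href="#team"', 'href="team.html"'),
--         ('href="shingles.html"', 'href="shingles.html"'),
--         ('href="team.html"', 'href="team.html"'),
--         ('href="index.html"', 'href="index.html"'),
--     ]
--
--     for old, new in replacements:
--         html_content = html_content.replace(old, new)
--
--     return html_content
-- ===== SOURCE B (Python) =====
-- def fix_navigation_links(html_content):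
--     """Fix navigation links to point to actual files (single pass with a lookup table)"""
--     table = {
--         'href="#gallery"': 'href="gallery.html"',
--         'href="#team"': 'href="team.html"',
--     }
--     out = []
--     i = 0
--     n = len(html_content)
--     while i < n:
--         for old, new in table.items():
--             if html_content.startswith(old, i):
--                 out.append(new)
--                 i += len(old)
--                 break
--         else:
--             out.append(html_content[i])
--             i += 1
--     return ''.join(out)
-- ===== Notes on version B (the rewrite author's own statement) =====
-- stated objective: alternative
-- what changed: A runs five sequential full-string .replace passes; B builds a lookup table of the two effective replacements (the other three pairs are identity no-ops) and rewrites the string in a single left-to-right scan, trying the table entries at each position.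
import Mathlib
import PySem

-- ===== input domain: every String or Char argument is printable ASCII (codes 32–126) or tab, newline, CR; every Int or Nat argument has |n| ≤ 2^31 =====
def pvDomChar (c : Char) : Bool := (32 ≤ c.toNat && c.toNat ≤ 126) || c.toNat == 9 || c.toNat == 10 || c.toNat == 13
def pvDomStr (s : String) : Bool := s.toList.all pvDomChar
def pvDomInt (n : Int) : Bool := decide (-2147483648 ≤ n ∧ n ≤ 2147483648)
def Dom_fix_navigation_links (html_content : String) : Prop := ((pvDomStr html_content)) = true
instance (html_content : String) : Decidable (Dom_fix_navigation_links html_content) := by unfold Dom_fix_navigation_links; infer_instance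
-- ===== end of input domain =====

-- B replaces A's five sequential full-string `.replace` passes by one left-to-right scan
-- driven by a lookup table of the two effective replacements (the other three are no-ops);
-- objective: alternative (single traversal instead of five).

-- ===== PORT A =====
def fix_navigation_links (html_content : String) : String :=
  (([("href=\"#gallery\"", "href=\"gallery.html\""),
     ("href=\"#team\"", "href=\"team.html\""),
     ("href=\"shingles.html\"", "href=\"shingles.html\""),
     ("href=\"team.html\"", "href=\"team.html\""),
     ("href=\"index.html\"", "href=\"index.html\"")] : List (String × String)).foldl
    (fun h pr => PySem.Str.replace h pr.1 pr.2) html_content)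

-- ===== PORT B =====
-- the lookup table of Source B, in dict order
def pvOld1 : List Char := "href=\"#gallery\"".toList
def pvNew1 : List Char := "href=\"gallery.html\"".toList
def pvOld2 : List Char := "href=\"#team\"".toList
def pvNew2 : List Char := "href=\"team.html\"".toList

-- Source B's while-loop: at each position try the table entries in order, else copy one char
def fixNavGo : List Char → List Char
  | [] => []
  | c :: t =>
    if pvOld1.isPrefixOf (c :: t) then pvNew1 ++ fixNavGo (t.drop (pvOld1.length - 1))
    else if pvOld2.isPrefixOf (c :: t) then pvNew2 ++ fixNavGo (t.drop (pvOld2.length - 1))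
    else c :: fixNavGo t
termination_by l => l.length
decreasing_by all_goals simp

def fix_navigation_links_alt (html_content : String) : String :=
  String.ofList (fixNavGo html_content.toList)

-- ===== PRECONDITION & SPEC =====
def Spec_fix_navigation_links (html_content : String) (out : String) : Prop := out = fix_navigation_links_alt html_content
instance (html_content : String) (out : String) : Decidable (Spec_fix_navigation_links html_content out) := by unfold Spec_fix_navigation_links; infer_instance

-- ===== CLAIM (what is proved, stated in full; the proofs are below) =====
def Claim_equal_fix_navigation_links : Prop := ∀ (html_content : String), Dom_fix_navigation_links html_content → Spec_fix_navigation_links html_content (fix_navigation_links html_content)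

-- ===== LEMMAS AND PROOFS =====

-- single-pattern scan: what Python's s.replace(p, r) computes, structurally
def scanP (p r : List Char) : List Char → List Char
  | [] => []
  | c :: t =>
    if p.isPrefixOf (c :: t) then r ++ scanP p r (t.drop (p.length - 1))
    else c :: scanP p r t
termination_by l => l.length
decreasing_by all_goals simp

theorem go_eq_scanP (p r : List Char) (hp : p ≠ []) :
    ∀ (fuel : Nat) (l acc : List Char), l.length ≤ fuel →
      PySem.Chars.replace.go p r fuel l acc = acc.reverse ++ scanP p r l := by
  intro fuel
  induction fuel with
  | zero =>
      intro l acc h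
      have : l = [] := List.eq_nil_of_length_eq_zero (Nat.le_zero.mp h)
      subst this
      simp [PySem.Chars.replace.go, scanP]
  | succ n ih =>
      intro l acc h
      cases l with
      | nil => simp [PySem.Chars.replace.go, scanP]
      | cons c t =>
          obtain ⟨k, hk⟩ : ∃ k, p.length = k + 1 :=
            ⟨p.length - 1, by have := List.length_pos_of_ne_nil hp; omega⟩
          rw [PySem.Chars.replace.go]
          by_cases hpre : p.isPrefixOf (c :: t)
          · have hdrop : (c :: t).drop p.length = t.drop (p.length - 1) := by
              rw [hk]; simp
            have ht : t.length ≤ n := by simpa using Nat.le_of_succ_le_succ h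
            rw [if_pos hpre, hdrop, ih _ _ (by simp [List.length_drop]; omega)]
            rw [scanP, if_pos hpre]
            simp
          · rw [if_neg hpre, ih _ _ (by simpa using Nat.le_of_succ_le_succ h)]
            rw [scanP, if_neg hpre]
            simp
  
theorem replace_eq_scanP (l p r : List Char) (hp : p ≠ []) :
    PySem.Chars.replace l p r = scanP p r l := by
  rw [PySem.Chars.replace, if_neg (by simpa using hp)]
  simpa using go_eq_scanP p r hp l.length l [] le_rfl

theorem scanP_self (p : List Char) (hp : p ≠ []) :
    ∀ (n : Nat) (l : List Char), l.length ≤ n → scanP p p l = l := by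
  intro n
  induction n with
  | zero =>
      intro l h
      have : l = [] := List.eq_nil_of_length_eq_zero (Nat.le_zero.mp h)
      subst this; simp [scanP]
  | succ n ih =>
      intro l h
      cases l with
      | nil => simp [scanP]
      | cons c t =>
          rw [scanP]
          by_cases hpre : p.isPrefixOf (c :: t)
          · obtain ⟨s, hs⟩ := List.isPrefixOf_iff_prefix.mp hpre
            obtain ⟨k, hk⟩ : ∃ k, p.length = k + 1 :=
              ⟨p.length - 1, by have := List.length_pos_of_ne_nil hp; omega⟩
            have hdrop : t.drop (p.length - 1) = s := by
              have h1 : (c :: t).drop p.length = s := by rw [← hs]; simp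
              rw [← h1, hk]; simp
            have hlen : s.length ≤ n := by
              have : (c :: t).length = p.length + s.length := by
                rw [← hs]; simp
              simp at this h ⊢; omega
            rw [if_pos hpre, hdrop, ih s hlen, ← hs]
          · rw [if_neg hpre, ih t (by simpa using Nat.le_of_succ_le_succ h)]

-- p never matches at a position strictly inside a (for any continuation)
def NoHit (p a : List Char) : Prop :=
  ∀ i < a.length, ¬ (p <+: a.drop i) ∧ ¬ (a.drop i <+: p)

theorem scanP_append (p r : List Char) :
    ∀ (a : List Char), NoHit p a → ∀ X, scanP p r (a ++ X) = a ++ scanP p r X := by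
  intro a
  induction a with
  | nil => intro _ X; simp
  | cons c b ih =>
      intro h X
      have h0 := h 0 (by simp)
      simp only [List.drop_zero] at h0
      have hnp : ¬ p.isPrefixOf ((c :: b) ++ X) := by
        rw [List.isPrefixOf_iff_prefix]
        intro hp
        by_cases hl : p.length ≤ (c :: b).length
        · exact h0.1 (List.prefix_of_prefix_length_le hp (List.prefix_append _ _) hl)
        · exact h0.2 (List.prefix_of_prefix_length_le (List.prefix_append _ _) hp (by omega))
      have hb : NoHit p b := by
        intro i hi
        have := h (i + 1) (by simpa using Nat.succ_lt_succ hi)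
        simpa using this
      rw [List.cons_append, scanP, if_neg (by simpa using hnp), ih hb X]
      simp

theorem scanP_match (p r X : List Char) (hp : p ≠ []) :
    scanP p r (p ++ X) = r ++ scanP p r X := by
  cases p with
  | nil => exact absurd rfl hp
  | cons a q =>
      rw [List.cons_append, scanP,
        if_pos (List.isPrefixOf_iff_prefix.mpr (by simpa using List.prefix_append (a :: q) X))]
      simp

theorem noHit_new1_old2 : NoHit pvOld2 pvNew1 := by
  unfold NoHit pvOld2 pvNew1; decide

theorem noHit_old2_old1 : NoHit pvOld1 pvOld2 := by
  unfold NoHit pvOld1 pvOld2; decide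

theorem drop_old2_not_prefix_new1 : ∀ j < pvOld2.length, ¬ pvOld2.drop j <+: pvNew1 := by
  unfold pvOld2 pvNew1; decide

-- a pvOld2-suffix matching in the pvOld1-replaced text matches in the original text
theorem scanP1_reflect :
    ∀ (t : List Char) (j : Nat), j ≤ pvOld2.length →
      pvOld2.drop j <+: scanP pvOld1 pvNew1 t → pvOld2.drop j <+: t := by
  intro t
  induction t with
  | nil =>
      intro j _ hpre
      simp only [scanP] at hpre
      simpa [List.prefix_nil.mp hpre] using List.nil_prefix
  | cons c t ih =>
      intro j hj hpre
      rcases Nat.lt_or_ge j pvOld2.length with hlt | hge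
      · by_cases h1 : pvOld1.isPrefixOf (c :: t)
        · exfalso
          rw [scanP, if_pos h1] at hpre
          have hlen : (pvOld2.drop j).length ≤ pvNew1.length := by
            simp [pvOld2, pvNew1]; omega
          exact drop_old2_not_prefix_new1 j hlt
            (List.prefix_of_prefix_length_le hpre (List.prefix_append _ _) hlen)
        · rw [scanP, if_neg h1] at hpre
          rw [List.drop_eq_getElem_cons hlt] at hpre ⊢
          obtain ⟨hc, htail⟩ := List.cons_prefix_cons.mp hpre
          exact List.cons_prefix_cons.mpr ⟨hc, ih (j + 1) hlt htail⟩
      · have : j = pvOld2.length := le_antisymm hj hge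
        subst this
        simpa using List.nil_prefix

theorem fixNavGo_eq_scan :
    ∀ (n : Nat) (l : List Char), l.length ≤ n →
      scanP pvOld2 pvNew2 (scanP pvOld1 pvNew1 l) = fixNavGo l := by
  intro n
  induction n with
  | zero =>
      intro l h
      have : l = [] := List.eq_nil_of_length_eq_zero (Nat.le_zero.mp h)
      subst this; simp [scanP, fixNavGo]
  | succ n ih =>
      intro l h
      cases l with
      | nil => simp [scanP, fixNavGo]
      | cons c t =>
          by_cases h1 : pvOld1.isPrefixOf (c :: t)
          · obtain ⟨s, hs⟩ := List.isPrefixOf_iff_prefix.mp h1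
            have hdrop : t.drop (pvOld1.length - 1) = s := by
              have hx : (c :: t).drop pvOld1.length = s := by rw [← hs]; simp
              rw [← hx]; rfl
            have hlen : s.length ≤ n := by
              have : (c :: t).length = pvOld1.length + s.length := by rw [← hs]; simp
              simp [pvOld1] at this h ⊢; omega
            rw [scanP, if_pos h1, hdrop, scanP_append _ _ _ noHit_new1_old2,
              ih s hlen, fixNavGo, if_pos h1, hdrop]
          · by_cases h2 : pvOld2.isPrefixOf (c :: t)
            · obtain ⟨s, hs⟩ := List.isPrefixOf_iff_prefix.mp h2
              have hdrop : t.drop (pvOld2.length - 1) = s := by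
                have hx : (c :: t).drop pvOld2.length = s := by rw [← hs]; simp
                rw [← hx]; rfl
              have hlen : s.length ≤ n := by
                have : (c :: t).length = pvOld2.length + s.length := by rw [← hs]; simp
                simp [pvOld2] at this h ⊢; omega
              rw [← hs, scanP_append _ _ _ noHit_old2_old1,
                scanP_match _ _ _ (by decide), ih s hlen]
              rw [hs, fixNavGo, if_neg h1, if_pos h2, hdrop]
            · have hscan : scanP pvOld1 pvNew1 (c :: t) = c :: scanP pvOld1 pvNew1 t := by
                rw [scanP, if_neg h1]
              have hnot : ¬ pvOld2.isPrefixOf (c :: scanP pvOld1 pvNew1 t) := by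
                rw [List.isPrefixOf_iff_prefix, ← hscan]
                intro hx
                have := scanP1_reflect (c :: t) 0 (by simp) (by simpa using hx)
                exact h2 (List.isPrefixOf_iff_prefix.mpr (by simpa using this))
              rw [hscan, scanP, if_neg hnot, ih t (by simpa using Nat.le_of_succ_le_succ h),
                fixNavGo, if_neg h1, if_neg h2]
  
-- ===== VERDICT (by name: the statement is the Claim_ definition above) =====
theorem fix_navigation_links_spec : Claim_equal_fix_navigation_links := by
  intro s _
  unfold Spec_fix_navigation_links fix_navigation_links fix_navigation_links_alt
  simp only [List.foldl]
  have e1 : ∀ l, PySem.Chars.replace l "href=\"#gallery\"".toList "href=\"gallery.html\"".toList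
      = scanP pvOld1 pvNew1 l := fun l => replace_eq_scanP _ _ _ (by decide)
  have e2 : ∀ l, PySem.Chars.replace l "href=\"#team\"".toList "href=\"team.html\"".toList
      = scanP pvOld2 pvNew2 l := fun l => replace_eq_scanP _ _ _ (by decide)
  have e3 : ∀ l, PySem.Chars.replace l "href=\"shingles.html\"".toList "href=\"shingles.html\"".toList = l := fun l => by
    rw [replace_eq_scanP _ _ _ (by decide)]; exact scanP_self _ (by decide) l.length l le_rfl
  have e4 : ∀ l, PySem.Chars.replace l "href=\"team.html\"".toList "href=\"team.html\"".toList = l := fun l => by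
    rw [replace_eq_scanP _ _ _ (by decide)]; exact scanP_self _ (by decide) l.length l le_rfl
  have e5 : ∀ l, PySem.Chars.replace l "href=\"index.html\"".toList "href=\"index.html\"".toList = l := fun l => by
    rw [replace_eq_scanP _ _ _ (by decide)]; exact scanP_self _ (by decide) l.length l le_rfl
  apply String.toList_inj.mp
  simp only [PySem.Str.replace, String.toList_ofList]
  rw [e5, e4, e3, e2, e1]
  exact fixNavGo_eq_scan s.toList.length s.toList le_rfl
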